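-- pv_equiv track=rewrite | github.com/asiloisad/pulsar-language-sofistik | build/build.py | optimize_pattern
-- ===== SOURCE A (Python) =====
-- from collections import defaultdict
--
-- def optimize_pattern(keyword_list):
--     """
--     Create optimized regex pattern by grouping keywords by first character.
--     This reduces backtracking and improves matching performance.
--
--     Args:
--         keyword_list: List of keywords to optimize into a regex pattern
--
--     Returns:
--         Optimized regex pattern string
--     """
--     if not keyword_list:
--         return ""
--
--     # Group keywords by their first character (case-insensitive)
--     keywords_grouped_by_first_char = defaultdict(list)
--     for keyword in keyword_list:
--         first_character = keyword[0].upper()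
--         keywords_grouped_by_first_char[first_character].append(keyword)
--
--     # Sort within each group by length (longest first) to avoid prefix matching issues
--     for character in keywords_grouped_by_first_char:
--         keywords_grouped_by_first_char[character].sort(key=lambda x: (-len(x), x))
--
--     # Build optimized pattern
--     if len(keywords_grouped_by_first_char) == 1:
--         # Single character group - use simple alternation
--         character, word_list = list(keywords_grouped_by_first_char.items())[0]
--         return "|".join(word_list)
--
--     # Multiple character groups - use character class optimization
--     pattern_parts = []
--     for character in sorted(keywords_grouped_by_first_char.keys()):
--         word_list = keywords_grouped_by_first_char[character]
--         if len(word_list) == 1: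
--             pattern_parts.append(word_list[0])
--         else:
--             # Group words with same first character
--             word_suffixes = '|'.join(word[1:] for word in word_list)
--             pattern_parts.append(f"(?:{character}(?:{word_suffixes}))")
--
--     return "|".join(pattern_parts)
-- ===== SOURCE B (Python) =====
-- def optimize_pattern(keyword_list):
--     if not keyword_list:
--         return ""
--     # distinct first letters, uppercased, in sorted order; no dict of groups is ever built
--     chars = sorted({w[0].upper() for w in keyword_list})
--
--     def bucket(c):
--         # select this letter's words straight from the input, longest (then lexicographic) first
--         return sorted((w for w in keyword_list if w[0].upper() == c),
--                       key=lambda w: (-len(w), w))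
--
--     if len(chars) == 1:
--         return "|".join(bucket(chars[0]))
--     parts = []
--     for c in chars:
--         ws = bucket(c)
--         parts.append(ws[0] if len(ws) == 1
--                      else "(?:%s(?:%s))" % (c, "|".join(w[1:] for w in ws)))
--     return "|".join(parts)
-- ===== Notes on version B (the rewrite author's own statement) =====
-- stated objective: simpler
-- what changed: Drops A's defaultdict grouping and per-group in-place sorts: B never builds a grouping structure, it takes the sorted set of distinct first letters and for each letter re-scans the input list with a filter+sort (nested scans instead of one hash-grouping pass).
import Mathlib
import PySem

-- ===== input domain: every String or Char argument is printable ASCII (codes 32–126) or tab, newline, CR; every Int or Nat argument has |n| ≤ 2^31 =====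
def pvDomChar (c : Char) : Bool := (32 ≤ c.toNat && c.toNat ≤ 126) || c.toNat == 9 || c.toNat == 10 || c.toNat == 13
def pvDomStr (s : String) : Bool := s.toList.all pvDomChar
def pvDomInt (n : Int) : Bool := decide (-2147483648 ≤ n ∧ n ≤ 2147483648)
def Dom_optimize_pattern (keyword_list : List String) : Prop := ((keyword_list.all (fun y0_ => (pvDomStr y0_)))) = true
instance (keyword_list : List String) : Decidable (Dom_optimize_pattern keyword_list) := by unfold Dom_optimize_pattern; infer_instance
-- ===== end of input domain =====

-- B drops A's defaultdict grouping and per-group in-place sorts entirely: it walks the sorted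
-- set of distinct first letters and re-scans the input with a filter+sort per letter
-- (objective: simpler, no grouping structure; same return value, not faster).

-- ===== PORT A =====
-- keyword[0].upper(), both sources' key (the .getD default is never reached under Pre_,
-- which demands nonempty keywords exactly where Python raises IndexError)
def pyUpperFirst (w : String) : Char :=
  PySem.Chars.upperChar ((PySem.Str.pyGet? w 0).getD ' ')

-- keywords_grouped_by_first_char: the defaultdict(list) append loop
def buildGroups (keyword_list : List String) : PySem.Dict Char (List String) :=
  keyword_list.foldl (fun d w => d.modify (pyUpperFirst w) [] (fun l => l ++ [w])) PySem.Dict.empty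

-- the in-place `.sort(key=lambda x: (-len(x), x))` of every group, iterating over the dict's keys
def sortGroups (d : PySem.Dict Char (List String)) : PySem.Dict Char (List String) :=
  d.keys.foldl
    (fun d' c => d'.modify c [] (fun l => PySem.List.sorted2 l (fun x => -(PySem.Str.len x)) (fun x => x))) d

def optimize_pattern (keyword_list : List String) : String :=
  if keyword_list = [] then "" else
  if (sortGroups (buildGroups keyword_list)).size = 1 then
    -- character, word_list = list(items())[0]; return "|".join(word_list)
    match (sortGroups (buildGroups keyword_list)).items with
    | (_, word_list) :: _ => PySem.Str.join "|" word_list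
    | [] => ""
  else
    PySem.Str.join "|"
      ((PySem.List.sorted (sortGroups (buildGroups keyword_list)).keys (fun c => c)).foldl
        (fun acc c =>
          acc ++ [if ((sortGroups (buildGroups keyword_list)).getD c []).length = 1 then
                    (PySem.List.pyGet? ((sortGroups (buildGroups keyword_list)).getD c []) 0).getD ""
                  else "(?:" ++ String.ofList [c] ++ "(?:" ++
                       PySem.Str.join "|" (((sortGroups (buildGroups keyword_list)).getD c []).map
                         (fun w => PySem.Str.slice w (some 1) none)) ++ "))"])
        [])

-- ===== PORT B =====
-- sorted({w[0].upper() for w in keyword_list}): the set comprehension then sorted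
def bChars (keyword_list : List String) : List Char :=
  PySem.List.sorted (PySem.Set.ofList (keyword_list.map pyUpperFirst)) (fun c => c)

-- bucket(c): filter the input for this letter, sorted(key=lambda w: (-len(w), w))
def bBucket (keyword_list : List String) (c : Char) : List String :=
  PySem.List.sorted2 (keyword_list.filter (fun w => pyUpperFirst w == c))
    (fun w => -(PySem.Str.len w)) (fun w => w)

def optimize_pattern_alt (keyword_list : List String) : String :=
  if keyword_list = [] then "" else
  if (bChars keyword_list).length = 1 then
    PySem.Str.join "|" (bBucket keyword_list ((PySem.List.pyGet? (bChars keyword_list) 0).getD ' '))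
  else
    PySem.Str.join "|" ((bChars keyword_list).map (fun c =>
      if (bBucket keyword_list c).length = 1 then
        (PySem.List.pyGet? (bBucket keyword_list c) 0).getD ""
      else "(?:" ++ String.ofList [c] ++ "(?:" ++
           PySem.Str.join "|" ((bBucket keyword_list c).map
             (fun w => PySem.Str.slice w (some 1) none)) ++ "))"))

-- ===== PRECONDITION & SPEC =====
-- Pre_ excludes lists containing an empty keyword: there Python A raises IndexError on
-- keyword[0] (and B's set comprehension raises the same way), so A returns no value to match.
def Pre_optimize_pattern (keyword_list : List String) : Prop :=
  ∀ w ∈ keyword_list, w ≠ ""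
instance (keyword_list : List String) : Decidable (Pre_optimize_pattern keyword_list) := by
  unfold Pre_optimize_pattern; infer_instance
def pvWitness_optimize_pattern : List String := ["abc", "Axy", "b", "ab"]
def Spec_optimize_pattern (keyword_list : List String) (out : String) : Prop := out = optimize_pattern_alt keyword_list
instance (keyword_list : List String) (out : String) : Decidable (Spec_optimize_pattern keyword_list out) := by unfold Spec_optimize_pattern; infer_instance

-- ===== CLAIM (what is proved, stated in full; the proofs are below) =====
def Claim_equal_optimize_pattern : Prop := ∀ (keyword_list : List String), Dom_optimize_pattern keyword_list → Pre_optimize_pattern keyword_list → Spec_optimize_pattern keyword_list (optimize_pattern keyword_list)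

-- ===== LEMMAS AND PROOFS =====

-- the within-group sort key as a lexicographic pair, and group/character abbreviations (proof-side)
def opIN (w : String) : Int ×ₗ String := toLex (-(PySem.Str.len w), w)
def opFilt (kl : List String) (c : Char) : List String := kl.filter (fun w => pyUpperFirst w == c)
def opG (kl : List String) (c : Char) : List String := PySem.List.sorted (opFilt kl c) opIN
def opCS (kl : List String) : List Char := PySem.Set.ofList (kl.map pyUpperFirst)
def opBS (kl : List String) : List Char := PySem.List.sorted (opCS kl) (fun c => c)

-- a two-key Python sort is the one-key sort by the lexicographic pair
theorem sorted2_eq_sorted_lex {α κ₁ κ₂ : Type} [LinearOrder κ₁] [LinearOrder κ₂]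
    (xs : List α) (k1 : α → κ₁) (k2 : α → κ₂) :
    PySem.List.sorted2 xs k1 k2 = PySem.List.sorted xs (fun x => toLex (k1 x, k2 x)) := by
  simp only [PySem.List.sorted2, PySem.List.sorted]
  congr 1
  funext acc x
  congr 1
  funext a b
  simp only [if_neg (by decide : ¬ (false = true))]
  rcases lt_trichotomy (k1 a) (k1 b) with h | h | h
  · simp [Prod.Lex.lt_iff, h]
  · simp [Prod.Lex.lt_iff, h]
  · simp only [Prod.Lex.lt_iff, ofLex_toLex, not_lt.mpr (le_of_lt h), decide_false]
    simp [h]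
    intro heq
    exact absurd heq (ne_of_gt h)

-- dict-side characterisation
theorem d1_getD (kl : List String) (c : Char) :
    (kl.foldl (fun d w => d.modify (pyUpperFirst w) [] (fun l => l ++ [w])) PySem.Dict.empty).getD c []
      = opFilt kl c := by
  have h : kl.foldl (fun d w => d.modify (pyUpperFirst w) [] (fun l => l ++ [w])) PySem.Dict.empty
      = (kl.map (fun w => (pyUpperFirst w, w))).foldl
          (fun d p => d.modify p.1 [] (fun l => l ++ [p.2])) PySem.Dict.empty := by
    rw [List.foldl_map]
  rw [h, PySem.Dict.getD_foldl_modify_append, PySem.Dict.getD_empty, List.filter_map,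
    List.map_map]
  simp [opFilt, Function.comp_def]

theorem d1_keys (kl : List String) :
    (kl.foldl (fun d w => d.modify (pyUpperFirst w) [] (fun l => l ++ [w]))
      (PySem.Dict.empty : PySem.Dict Char (List String))).keys = opCS kl := by
  have h := PySem.Dict.keys_foldl_modify_key kl pyUpperFirst ([] : List String)
    (fun _ w => (fun l => l ++ [w])) PySem.Dict.empty
  rw [h]
  rfl

theorem set_update_self {κ : Type} [BEq κ] [LawfulBEq κ] (s : PySem.Set κ) (l : List κ)
    (h : ∀ x ∈ l, x ∈ s) : PySem.Set.update s l = s := by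
  induction l generalizing s with
  | nil => rfl
  | cons x l ih =>
    rw [PySem.Set.update, List.foldl_cons]
    have hadd : PySem.Set.add s x = s := by
      have hcx : s.contains x = true := by
        simpa [PySem.Set.contains] using h x List.mem_cons_self
      rw [PySem.Set.add, if_pos hcx]
    rw [hadd]
    exact ih s (fun y hy => h y (List.mem_cons_of_mem _ hy))

theorem foldl_modify_sort_getD {κ ν : Type} [BEq κ] [LawfulBEq κ] [DecidableEq κ]
    (ks : List κ) (f : List ν → List ν) (d : PySem.Dict κ (List ν)) (hnd : ks.Nodup) (c : κ) :
    (ks.foldl (fun d' c' => d'.modify c' [] f) d).getD c []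
      = if c ∈ ks then f (d.getD c []) else d.getD c [] := by
  induction ks generalizing d with
  | nil => simp
  | cons k ks ih =>
    obtain ⟨hk, hnd'⟩ := List.pairwise_cons.mp hnd
    rw [List.foldl_cons, ih _ hnd', PySem.Dict.getD_modify]
    by_cases h1 : c ∈ ks
    · have : c ≠ k := fun hh => hk c h1 hh.symm
      simp [h1, this]
    · by_cases h2 : c = k
      · subst h2; simp [h1]
      · simp [h1, h2]

theorem foldl_modify_keys {κ ν : Type} [BEq κ] [LawfulBEq κ]
    (ks : List κ) (f : List ν → List ν) (d : PySem.Dict κ (List ν)) :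
    (ks.foldl (fun d' c' => d'.modify c' [] f) d).keys = PySem.Set.update d.keys ks := by
  have h := PySem.Dict.keys_foldl_modify_key ks (fun c => c) ([] : List ν)
    (fun _ _ => f) d
  simpa using h

theorem main_eq (kl : List String) : optimize_pattern kl = optimize_pattern_alt kl := by
  rcases eq_or_ne kl [] with rfl | hkl
  · rfl
  rw [optimize_pattern, optimize_pattern_alt, if_neg hkl, if_neg hkl]
  have hsort2 : ∀ l : List String,
      PySem.List.sorted2 l (fun x => -(PySem.Str.len x)) (fun x => x)
        = PySem.List.sorted l opIN := by
    intro l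
    rw [sorted2_eq_sorted_lex]
    rfl
  have hbucket : ∀ c, bBucket kl c = opG kl c := by
    intro c
    rw [bBucket, hsort2]
    rfl
  have hchars : bChars kl = opBS kl := rfl
  set d2 := sortGroups (buildGroups kl) with hd2
  have hk1 : (buildGroups kl).keys = opCS kl := d1_keys kl
  have hndCS : (opCS kl).Nodup := PySem.Set.nodup_ofList _
  have hk2 : d2.keys = opCS kl := by
    rw [hd2, sortGroups, foldl_modify_keys, hk1, set_update_self _ _ (fun x hx => hk1 ▸ hx)]
  have hgd : ∀ c ∈ opCS kl, d2.getD c [] = opG kl c := by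
    intro c hc
    rw [hd2, sortGroups, foldl_modify_sort_getD _ _ _ (hk1 ▸ hndCS) c, hk1, if_pos hc,
      buildGroups, d1_getD, hsort2]
    rfl
  have hsize : d2.size = (opCS kl).length := by
    rw [← hk2, PySem.Dict.keys, PySem.Dict.size, List.length_map]
  have hlenBS : (opBS kl).length = (opCS kl).length := by
    simp [opBS, PySem.List.length_sorted]
  by_cases hn : (opCS kl).length = 1
  · -- single group: both sides join the unique letter's sorted words
    obtain ⟨c, hc⟩ := List.length_eq_one_iff.mp hn
    have hcin : c ∈ opCS kl := by rw [hc]; exact List.mem_cons_self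
    have hitems : d2.items = [(c, opG kl c)] := by
      rw [PySem.Dict.items_eq_map_keys d2 (hk2 ▸ hndCS) [], hk2, hc, List.map_cons,
        List.map_nil, hgd c hcin]
    have hBS1 : opBS kl = [c] := by
      rw [opBS, hc]
      exact PySem.List.sorted_eq_self_of_pairwise _ _ (List.pairwise_singleton _ _)
    rw [if_pos (by rw [hsize, hn]), if_pos (by rw [hchars, hBS1]; rfl), hitems, hchars, hBS1,
      hbucket]
    simp [PySem.List.pyGet?, PySem.List.pyIdx?]
  · -- several letters: pointwise equal parts over the same sorted characters
    rw [if_neg (by rw [hsize]; exact hn), if_neg (by rw [hchars, hlenBS]; exact hn)]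
    rw [PySem.List.foldl_append_singleton_eq_map
      (fun c => if (d2.getD c []).length = 1 then (PySem.List.pyGet? (d2.getD c []) 0).getD ""
        else "(?:" ++ String.ofList [c] ++ "(?:" ++
          PySem.Str.join "|" ((d2.getD c []).map (fun w => PySem.Str.slice w (some 1) none)) ++ "))")]
    rw [List.nil_append, hk2, hchars,
      (rfl : PySem.List.sorted (opCS kl) (fun c : Char => c) = opBS kl)]
    congr 1
    refine List.map_congr_left ?_
    intro c hcBS
    have hcin : c ∈ opCS kl := by
      simp only [PySem.List.mem_sorted] at hcBS
      exact hcBS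
    rw [hgd c hcin, hbucket]

-- ===== VERDICT (by name: the statement is the Claim_ definition above) =====
theorem optimize_pattern_spec : Claim_equal_optimize_pattern := by
  intro kl _ _
  unfold Spec_optimize_pattern
  exact main_eq kl
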